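-- pv_equiv track=rewrite | github.com/elprofesoriqo/Algorithms | Ciągi/PodciągSuma.py | podciag
-- ===== SOURCE A (Python) =====
-- def podciag(n: int, tab: list) -> int:
--     pod_ciag=[]
--     poczatek=0
--     max = 1
--     length = 1
--     p=0
--     s=0
--     for i in range(1, n):
--         if tab[i]>tab[i-1]:
--             length+=1
--             if length>max:
--                 max=length
--                 poczatek=p
--         else:
--             p=i
--             length=1
--
--     for i in range(poczatek, poczatek+max):
--         pod_ciag.append(tab[i])
--         s=s+tab[i]
--
--     return s
-- ===== SOURCE B (Python) =====
-- def podciag(n, tab):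
--     # Decompose tab[:n] into its maximal strictly increasing runs as (sum, length)
--     # pairs in one pass, then pick the first longest run and return its sum.
--     runs = [(tab[0], 1)]
--     for i in range(1, n):
--         if tab[i] > tab[i - 1]:
--             s, l = runs[-1]
--             runs[-1] = (s + tab[i], l + 1)
--         else:
--             runs.append((tab[i], 1))
--     return max(runs, key=lambda r: r[1])[0]
-- ===== Notes on version B (the rewrite author's own statement) =====
-- stated objective: alternative
-- what changed: A runs a state machine tracking (start,max,length,p) over indices and then RE-SCANS the array summing tab[poczatek:poczatek+max]; B decomposes the prefix into its increasing runs as (sum,length) pairs in one pass and returns the sum component of the first longest run via max(key=len) - no second scan and no index bookkeeping.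
import Mathlib
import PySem

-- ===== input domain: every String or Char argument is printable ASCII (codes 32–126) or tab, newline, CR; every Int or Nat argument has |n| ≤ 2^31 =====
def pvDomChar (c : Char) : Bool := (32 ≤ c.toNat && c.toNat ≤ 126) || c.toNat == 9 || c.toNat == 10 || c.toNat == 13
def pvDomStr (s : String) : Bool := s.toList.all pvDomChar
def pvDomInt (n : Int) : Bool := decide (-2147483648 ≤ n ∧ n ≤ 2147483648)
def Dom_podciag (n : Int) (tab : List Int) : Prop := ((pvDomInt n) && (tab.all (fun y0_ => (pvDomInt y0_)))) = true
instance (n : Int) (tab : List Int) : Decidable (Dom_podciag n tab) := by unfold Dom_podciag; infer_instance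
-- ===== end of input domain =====

-- B replaces A's index state machine plus re-scan of tab[poczatek:poczatek+max] by a
-- one-pass run decomposition into (sum, length) pairs followed by max-by-length;
-- same cost, different decomposition.


-- ===== PORT A =====
-- loop body of A's scan; state (poczatek, max, length, p)
def pvStepA (tab : List Int) (st : Int × Int × Int × Int) (i : Int) : Int × Int × Int × Int :=
  if PySem.List.pyGetD tab i 0 > PySem.List.pyGetD tab (i - 1) 0 then
    if st.2.2.1 + 1 > st.2.1 then (st.2.2.2, st.2.2.1 + 1, st.2.2.1 + 1, st.2.2.2)
    else (st.1, st.2.1, st.2.2.1 + 1, st.2.2.2)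
  else (st.1, st.2.1, 1, i)

-- scan for (poczatek, max), then a second loop re-sums tab[poczatek:poczatek+max]
def podciag (n : Int) (tab : List Int) : Int :=
  let st := (PySem.List.pyRange 1 n 1).foldl (pvStepA tab) (0, 1, 1, 0)
  (PySem.List.pyRange st.1 (st.1 + st.2.1) 1).foldl
    (fun s i => s + PySem.List.pyGetD tab i 0) 0

-- ===== PORT B =====
-- loop body of B: extend the last (sum, length) run or start a new one
def pvStepB (tab : List Int) (runs : List (Int × Int)) (i : Int) : List (Int × Int) :=
  if PySem.List.pyGetD tab i 0 > PySem.List.pyGetD tab (i - 1) 0 then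
    match runs.getLast? with
    | some (s, l) => runs.dropLast ++ [(s + PySem.List.pyGetD tab i 0, l + 1)]
    | none => runs
  else runs ++ [(PySem.List.pyGetD tab i 0, 1)]

-- build the run list, then return the sum of the first longest run (max with key len)
def podciag_alt (n : Int) (tab : List Int) : Int :=
  match PySem.List.max?
      ((PySem.List.pyRange 1 n 1).foldl (pvStepB tab) [(PySem.List.pyGetD tab 0 0, 1)])
      (fun r => r.2) with
  | some r => r.1
  | none => 0

-- ===== PRECONDITION & SPEC =====
-- Pre_ excludes exactly the inputs where Python A raises IndexError: the empty list
-- (the final loop reads tab[0]) and n larger than len(tab) (the scan reads tab[n-1]).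
def Pre_podciag (n : Int) (tab : List Int) : Prop := tab ≠ [] ∧ n ≤ (tab.length : Int)
instance (n : Int) (tab : List Int) : Decidable (Pre_podciag n tab) := by unfold Pre_podciag; infer_instance
def pvWitness_podciag : Int × List Int := (4, [3, 1, 2, 5])

def Spec_podciag (n : Int) (tab : List Int) (out : Int) : Prop := out = podciag_alt n tab
instance (n : Int) (tab : List Int) (out : Int) : Decidable (Spec_podciag n tab out) := by unfold Spec_podciag; infer_instance

-- ===== CLAIM (what is proved, stated in full; the proofs are below) =====
def Claim_equal_podciag : Prop := ∀ (n : Int) (tab : List Int), Dom_podciag n tab → Pre_podciag n tab → Spec_podciag n tab (podciag n tab)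

-- ===== LEMMAS AND PROOFS =====

-- sum of tab[a:a+l]
def pvS (tab : List Int) (a l : Nat) : Int := ((tab.drop a).take l).sum

theorem pvS_succ (tab : List Int) (a l : Nat) (h : a + l < tab.length) :
    pvS tab a (l + 1) = pvS tab a l + tab[a + l] := by
  unfold pvS
  have hl : l < (tab.drop a).length := by simp; omega
  rw [List.take_succ]
  have : (tab.drop a)[l]? = some (tab.drop a)[l] := List.getElem?_eq_getElem hl
  rw [this]
  simp [List.getElem_drop]

theorem pvS_one (tab : List Int) (k : Nat) (h : k < tab.length) :
    pvS tab k 1 = tab[k] := by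
  unfold pvS
  rw [List.take_one]
  have : (tab.drop k).head? = some tab[k] := by
    rw [List.head?_drop]; exact List.getElem?_eq_getElem h
  simp [this]

theorem pv_getD_nat (tab : List Int) (k : Nat) (h : k < tab.length) :
    PySem.List.pyGetD tab (k : Int) 0 = tab[k] := by
  rw [PySem.List.pyGetD_natCast]; exact List.getD_eq_getElem _ _ h

-- A's second loop sums the slice
theorem pv_sum_loop (tab : List Int) (a l : Nat) (h : a + l ≤ tab.length) :
    (PySem.List.pyRange (a : Int) ((a : Int) + (l : Int)) 1).foldl
      (fun s i => s + PySem.List.pyGetD tab i 0) 0 = pvS tab a l := by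
  induction l with
  | zero => simp [PySem.List.pyRange_one_eq_nil, pvS]
  | succ m ih =>
    have hm : a + m < tab.length := by omega
    have hsplit : PySem.List.pyRange (a : Int) ((a : Int) + (m : Int) + 1) 1
        = PySem.List.pyRange (a : Int) ((a : Int) + (m : Int)) 1 ++ [(a : Int) + (m : Int)] :=
      PySem.List.pyRange_one_succ_right (by omega)
    have hcast : ((m + 1 : Nat) : Int) = (m : Int) + 1 := by push_cast; ring
    rw [hcast, ← add_assoc, hsplit, List.foldl_append, ih (by omega)]
    simp only [List.foldl_cons, List.foldl_nil]
    have hg : PySem.List.pyGetD tab ((a : Int) + (m : Int)) 0 = tab[a + m] := by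
      have : ((a : Int) + (m : Int)) = ((a + m : Nat) : Int) := by push_cast; ring
      rw [this]; exact pv_getD_nat tab (a + m) hm
    rw [hg, pvS_succ tab a m hm]

theorem pv_max_append_none (runs : List (Int × Int)) (e : Int × Int)
    (h : PySem.List.max? runs (fun r => r.2) = none) :
    PySem.List.max? (runs ++ [e]) (fun r => r.2) = some e := by
  unfold PySem.List.max? at h ⊢
  rw [List.foldl_append, h]
  rfl

theorem pv_max_append_some (runs : List (Int × Int)) (e m : Int × Int)
    (h : PySem.List.max? runs (fun r => r.2) = some m) :
    PySem.List.max? (runs ++ [e]) (fun r => r.2)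
      = if m.2 < e.2 then some e else some m := by
  unfold PySem.List.max? at h ⊢
  rw [List.foldl_append, h]
  rfl

-- the joint invariant after processing indices 1..k-1 (k elements seen)
def pvInv (tab : List Int) (k : Nat)
    (st : Int × Int × Int × Int) (runs : List (Int × Int)) : Prop :=
  ∃ (pN aN mN : Nat) (pre : List (Int × Int)),
    st.2.2.2 = (pN : Int) ∧ st.1 = (aN : Int) ∧ st.2.1 = (mN : Int) ∧
    st.2.2.1 = ((k - pN : Nat) : Int) ∧
    pN < k ∧ aN + mN ≤ k ∧ 1 ≤ mN ∧ k - pN ≤ mN ∧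
    runs = pre ++ [(pvS tab pN (k - pN), ((k - pN : Nat) : Int))] ∧
    (∀ r ∈ pre, ∃ rl : Nat, r.2 = (rl : Int) ∧ rl ≤ mN) ∧
    PySem.List.max? runs (fun r => r.2) = some (pvS tab aN mN, (mN : Int))

theorem pv_inv_step (tab : List Int) (k : Nat) (hk1 : 1 ≤ k) (hk : k < tab.length)
    (st : Int × Int × Int × Int) (runs : List (Int × Int))
    (h : pvInv tab k st runs) :
    pvInv tab (k + 1) (pvStepA tab st (k : Int)) (pvStepB tab runs (k : Int)) := by
  obtain ⟨pN, aN, mN, pre, hp, ha, hm, hlenq, hpk, ham, hm1, hcm, hruns, hpre, hmax⟩ := h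
  have hget : PySem.List.pyGetD tab (k : Int) 0 = tab[k] := pv_getD_nat tab k hk
  by_cases hcond : PySem.List.pyGetD tab (k : Int) 0 > PySem.List.pyGetD tab ((k : Int) - 1) 0
  · -- increasing: the current run is extended
    have hlast : runs.getLast? = some (pvS tab pN (k - pN), ((k - pN : Nat) : Int)) := by
      rw [hruns, List.getLast?_concat]
    have hstepB : pvStepB tab runs (k : Int)
        = pre ++ [(pvS tab pN (k + 1 - pN), ((k + 1 - pN : Nat) : Int))] := by
      unfold pvStepB
      rw [if_pos hcond, hlast]
      show runs.dropLast
          ++ [(pvS tab pN (k - pN) + PySem.List.pyGetD tab (k : Int) 0, ((k - pN : Nat) : Int) + 1)]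
        = pre ++ [(pvS tab pN (k + 1 - pN), ((k + 1 - pN : Nat) : Int))]
      rw [hruns, List.dropLast_concat]
      have h1 : pvS tab pN (k - pN) + PySem.List.pyGetD tab (k : Int) 0
          = pvS tab pN (k + 1 - pN) := by
        rw [hget]
        have he : k + 1 - pN = (k - pN) + 1 := by omega
        rw [he, pvS_succ tab pN (k - pN) (by omega)]
        congr 2; omega
      have h2 : ((k - pN : Nat) : Int) + 1 = ((k + 1 - pN : Nat) : Int) := by push_cast; omega
      rw [h1, h2]
    by_cases hbig : st.2.2.1 + 1 > st.2.1
    · -- strictly longer than the best so far: current run becomes the best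
      have hbigN : mN < k + 1 - pN := by
        rw [hlenq, hm] at hbig; push_cast at hbig; omega
      have hstepA : pvStepA tab st (k : Int)
          = ((pN : Int), ((k + 1 - pN : Nat) : Int), ((k + 1 - pN : Nat) : Int), (pN : Int)) := by
        unfold pvStepA
        rw [if_pos hcond, if_pos hbig, hp, hlenq]
        have : ((k - pN : Nat) : Int) + 1 = ((k + 1 - pN : Nat) : Int) := by push_cast; omega
        rw [this]
      rw [hstepA, hstepB]
      refine ⟨pN, pN, k + 1 - pN, pre, rfl, rfl, rfl, rfl,
        by omega, by omega, by omega, by omega, rfl, ?_, ?_⟩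
      · intro r hr; obtain ⟨rl, hrl, hle⟩ := hpre r hr; exact ⟨rl, hrl, by omega⟩
      · cases hpm : PySem.List.max? pre (fun r => r.2) with
        | none => exact pv_max_append_none pre _ hpm
        | some m =>
          obtain ⟨rl, hrl, hle⟩ := hpre m (PySem.List.max?_mem hpm)
          rw [pv_max_append_some pre _ m hpm]
          have : m.2 < ((k + 1 - pN : Nat) : Int) := by rw [hrl]; push_cast; omega
          rw [if_pos this]
    · -- not longer: best unchanged, and it must live in pre
      have hsm : k - pN + 1 ≤ mN := by
        rw [hlenq, hm] at hbig; push_cast at hbig; omega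
      have hstepA : pvStepA tab st (k : Int)
          = ((aN : Int), (mN : Int), ((k + 1 - pN : Nat) : Int), (pN : Int)) := by
        unfold pvStepA
        rw [if_pos hcond, if_neg hbig, ha, hm, hp, hlenq]
        have : ((k - pN : Nat) : Int) + 1 = ((k + 1 - pN : Nat) : Int) := by push_cast; omega
        rw [this]
      rw [hstepA, hstepB]
      refine ⟨pN, aN, mN, pre, rfl, rfl, rfl, rfl,
        by omega, by omega, by omega, by omega, rfl, hpre, ?_⟩
      rw [hruns] at hmax
      cases hpm : PySem.List.max? pre (fun r => r.2) with
      | none =>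
        rw [pv_max_append_none pre _ hpm] at hmax
        simp only [Option.some.injEq, Prod.mk.injEq] at hmax
        exfalso
        have hc : (k - pN : Nat) = mN := by exact_mod_cast hmax.2
        omega
      | some m =>
        rw [pv_max_append_some pre _ m hpm] at hmax
        by_cases hlt : m.2 < ((k - pN : Nat) : Int)
        · rw [if_pos hlt] at hmax
          simp only [Option.some.injEq, Prod.mk.injEq] at hmax
          exfalso
          have hc : (k - pN : Nat) = mN := by exact_mod_cast hmax.2
          omega
        · rw [if_neg hlt] at hmax
          rw [pv_max_append_some pre _ m hpm]
          have hme : m = (pvS tab aN mN, (mN : Int)) := Option.some.inj hmax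
          have hm2 : m.2 = (mN : Int) := by rw [hme]
          have hnl : ¬ (m.2 < ((k + 1 - pN : Nat) : Int)) := by
            rw [hm2]; push_cast; omega
          rw [if_neg hnl]
          exact hmax
  · -- reset: a new run of length 1 starts at k
    have hstepA : pvStepA tab st (k : Int)
        = ((aN : Int), (mN : Int), 1, (k : Int)) := by
      unfold pvStepA
      rw [if_neg hcond, ha, hm]
    have hstepB : pvStepB tab runs (k : Int)
        = (pre ++ [(pvS tab pN (k - pN), ((k - pN : Nat) : Int))])
            ++ [(pvS tab k 1, ((1 : Nat) : Int))] := by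
      unfold pvStepB
      rw [if_neg hcond, hruns, hget, pvS_one tab k hk]
      norm_num
    rw [hstepA, hstepB]
    refine ⟨k, aN, mN, pre ++ [(pvS tab pN (k - pN), ((k - pN : Nat) : Int))],
      by norm_num, rfl, rfl, by have h1 : k + 1 - k = 1 := by omega
                                rw [h1]; norm_num,
      by omega, by omega, by omega, by omega, ?_, ?_, ?_⟩
    · have : k + 1 - k = 1 := by omega
      rw [this]
    · intro r hr
      rcases List.mem_append.mp hr with h' | h'
      · exact hpre r h'
      · simp only [List.mem_singleton] at h'
        exact ⟨k - pN, by rw [h'], by omega⟩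
    · rw [← hruns]
      rw [pv_max_append_some runs _ _ hmax]
      have hnl : ¬ (((pvS tab aN mN, (mN : Int)) : Int × Int).2
          < (((pvS tab k 1, ((1 : Nat) : Int)) : Int × Int)).2) := by
        simp only []
        push_cast; omega
      rw [if_neg hnl]

theorem pv_inv_main (tab : List Int) (k : Nat) (hk1 : 1 ≤ k) (hk : k ≤ tab.length) :
    pvInv tab k
      ((PySem.List.pyRange 1 (k : Int) 1).foldl (pvStepA tab) (0, 1, 1, 0))
      ((PySem.List.pyRange 1 (k : Int) 1).foldl (pvStepB tab) [(PySem.List.pyGetD tab 0 0, 1)]) := by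
  induction k with
  | zero => omega
  | succ m ih =>
    by_cases hm : m = 0
    · subst hm
      have hnil : PySem.List.pyRange 1 ((0 + 1 : Nat) : Int) 1 = [] :=
        PySem.List.pyRange_one_eq_nil (by norm_num)
      rw [hnil]
      simp only [List.foldl_nil]
      have h0 : 0 < tab.length := by omega
      have hx : pvS tab 0 1 = PySem.List.pyGetD tab 0 0 := by
        rw [pvS_one tab 0 h0, PySem.List.pyGetD_zero]
        cases tab with
        | nil => simp at h0
        | cons x xs => simp
      refine ⟨0, 0, 1, [], rfl, rfl, by norm_num, by norm_num, by omega, by omega,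
        by omega, by omega, by rw [hx]; norm_num, by simp, ?_⟩
      rw [hx]
      simp [PySem.List.max?]
    · have hm1 : 1 ≤ m := by omega
      have hsplit : PySem.List.pyRange 1 ((m + 1 : Nat) : Int) 1
          = PySem.List.pyRange 1 (m : Int) 1 ++ [(m : Int)] := by
        have hc : ((m + 1 : Nat) : Int) = (m : Int) + 1 := by push_cast; ring
        rw [hc]
        exact PySem.List.pyRange_one_succ_right (by omega)
      rw [hsplit, List.foldl_append, List.foldl_append]
      simp only [List.foldl_cons, List.foldl_nil]
      exact pv_inv_step tab m hm1 (by omega) _ _ (ih hm1 (by omega))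

-- ===== VERDICT (by name: the statement is the Claim_ definition above) =====
theorem podciag_spec : Claim_equal_podciag := by
  intro n tab _ hpre
  obtain ⟨hne, hnle⟩ := hpre
  unfold Spec_podciag
  simp only [podciag, podciag_alt]
  have hlen1 : 1 ≤ tab.length := by
    cases tab with
    | nil => exact absurd rfl hne
    | cons x xs => simp
  by_cases hn1 : n ≤ 1
  · -- the scan loop is empty in both programs
    have hnil : PySem.List.pyRange 1 n 1 = [] := PySem.List.pyRange_one_eq_nil hn1
    rw [hnil]
    simp only [List.foldl_nil]
    have hr : PySem.List.pyRange 0 1 1 = [0] := by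
      have := PySem.List.pyRange_one_singleton (a := (0 : Int))
      simpa using this
    simp [hr, PySem.List.max?]
  · -- n ≥ 2: run the joint invariant up to k = n.toNat
    push_neg at hn1
    have hkn : ((n.toNat : Nat) : Int) = n := by omega
    rw [← hkn]
    obtain ⟨pN, aN, mN, pre, hp, ha, hm, hlenq, hpk, ham, hm1, hcm, hruns, hpre, hmax⟩ :=
      pv_inv_main tab n.toNat (by omega) (by omega)
    rw [hmax, ha, hm]
    exact pv_sum_loop tab aN mN (by omega)
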